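-- pv_equiv track=rewrite | github.com/PhMeier/MA_Thesis | preprocess/prepro_verb_verid.py | loop_routine
-- ===== SOURCE A (Python) =====
-- def loop_routine(data, output_dict, negated):
--     """
--     Submethod of create_dataframe. Creates a dictionary containing the important columns.
--     :param data:
--     :return: output dict
--     """
--     signature_dictionary = {"+": "0", "o": "1", "-": "2", "+\n": "0", "o\n": "1", "-\n": "2"}
--     key_index = {"sentence": 3, "neg_sentence": 4, "complement": 5}  # , "signature":14}
--     for line in data[1:]:
--         for key in output_dict.keys():
--             if key == "signature":
--                 output_dict["signature"].append(signature_dictionary[line[14].split("/")[1 if negated else 0]])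
--             else:
--                 output_dict[key].append(line[key_index[key]])
--     return output_dict
-- ===== SOURCE B (Python) =====
-- def _cell(negated, line, key):
--     signature_dictionary = {"+": "0", "o": "1", "-": "2", "+\n": "0", "o\n": "1", "-\n": "2"}
--     key_index = {"sentence": 3, "neg_sentence": 4, "complement": 5}
--     if key == "signature":
--         return signature_dictionary[line[14].split("/")[1 if negated else 0]]
--     return line[key_index[key]]
--
--
-- def loop_routine(data, output_dict, negated):
--     """Staged, pure rewrite: build the row-major matrix of selected cells,
--     transpose it with zip(*...), and assemble a NEW dict in one comprehension.
--     (A mutates output_dict's lists in place; B does not - return value only.)"""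
--     keys = list(output_dict)
--     matrix = [[_cell(negated, line, key) for key in keys] for line in data[1:]]
--     cols = zip(*matrix) if matrix else [()] * len(keys)
--     return {k: v + list(col) for (k, v), col in zip(output_dict.items(), cols)}
-- ===== Notes on version B (the rewrite author's own statement) =====
-- stated objective: alternative
-- what changed: A mutates output_dict in place, appending cell-by-cell inside nested row/key loops; B is pure and staged: it first builds the whole row-major matrix of selected cells, transposes it once with zip(*matrix), and assembles a fresh result dict in a single comprehension, so no list is ever mutated and no append loop exists.
import Mathlib
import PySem

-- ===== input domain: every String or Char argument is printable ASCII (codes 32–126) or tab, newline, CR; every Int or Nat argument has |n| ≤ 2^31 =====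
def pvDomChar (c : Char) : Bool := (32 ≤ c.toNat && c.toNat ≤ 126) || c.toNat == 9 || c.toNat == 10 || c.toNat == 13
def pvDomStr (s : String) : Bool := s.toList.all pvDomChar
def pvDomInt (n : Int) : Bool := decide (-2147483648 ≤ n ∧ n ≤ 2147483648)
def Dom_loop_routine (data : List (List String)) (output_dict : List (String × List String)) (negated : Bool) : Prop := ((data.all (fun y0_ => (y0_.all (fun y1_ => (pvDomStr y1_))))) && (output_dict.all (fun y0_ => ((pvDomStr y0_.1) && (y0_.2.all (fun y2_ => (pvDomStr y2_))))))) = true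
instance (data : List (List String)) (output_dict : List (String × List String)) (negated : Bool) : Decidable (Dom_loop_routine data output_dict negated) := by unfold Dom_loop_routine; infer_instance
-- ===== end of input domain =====

-- B is a pure, staged rewrite (row-major matrix → zip(*…) transpose → one dict comprehension);
-- equivalence is about the RETURN value only: the Python A mutates output_dict's lists in place, B does not.

-- ===== PORT A =====
-- row-at-a-time, in place: for each data row, append one cell to every key's list
def loop_routine (data : List (List String)) (output_dict : List (String × List String)) (negated : Bool) : List (String × List String) :=
  let signature_dictionary : PySem.Dict String String :=
    PySem.Dict.ofList [("+", "0"), ("o", "1"), ("-", "2"), ("+\n", "0"), ("o\n", "1"), ("-\n", "2")]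
  let key_index : PySem.Dict String Int :=
    PySem.Dict.ofList [("sentence", 3), ("neg_sentence", 4), ("complement", 5)]
  ((PySem.List.slice data (some 1) none).foldl (fun d line =>
      d.keys.foldl (fun d key =>
        if key == "signature" then
          -- signature_dictionary[line[14].split("/")[1 if negated else 0]] (defaults unreachable under Pre_)
          d.modify "signature" []
            (fun v => v ++ [signature_dictionary.getD
              (PySem.List.pyGetD ((PySem.Str.split? (PySem.List.pyGetD line 14 "") "/").getD [])
                (if negated then 1 else 0) "") ""])
        else
          -- line[key_index[key]] (defaults unreachable under Pre_)
          d.modify key [] (fun v => v ++ [PySem.List.pyGetD line (key_index.getD key 0) ""])) d)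
    (PySem.Dict.mk output_dict)).items

-- ===== PORT B =====
-- B's helper _cell(negated, line, key)
def pvCell (negated : Bool) (line : List String) (key : String) : String :=
  let signature_dictionary : PySem.Dict String String :=
    PySem.Dict.ofList [("+", "0"), ("o", "1"), ("-", "2"), ("+\n", "0"), ("o\n", "1"), ("-\n", "2")]
  let key_index : PySem.Dict String Int :=
    PySem.Dict.ofList [("sentence", 3), ("neg_sentence", 4), ("complement", 5)]
  if key == "signature" then
    signature_dictionary.getD
      (PySem.List.pyGetD ((PySem.Str.split? (PySem.List.pyGetD line 14 "") "/").getD [])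
        (if negated then 1 else 0) "") ""
  else
    PySem.List.pyGetD line (key_index.getD key 0) ""

-- zip(*matrix): Python zip of the rows, truncating at the shortest row
def pvZipStar (m : List (List String)) : List (List String) :=
  if m.isEmpty || m.any List.isEmpty then []
  else (m.map (fun r => r.headD "")) :: pvZipStar (m.map List.tail)
termination_by (m.headD []).length
decreasing_by
  cases m with
  | nil => simp at *
  | cons r rs =>
    rename_i h
    simp only [List.isEmpty_cons, List.any_cons, Bool.false_or, Bool.or_eq_true,
      List.isEmpty_iff] at h
    push Not at h
    simp only [List.headD_cons]
    cases r with
    | nil => exact absurd rfl h.1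
    | cons a as => simp

-- staged and pure: matrix of cells, transpose, one fresh dict comprehension
def loop_routine_alt (data : List (List String)) (output_dict : List (String × List String)) (negated : Bool) : List (String × List String) :=
  let keys := (PySem.Dict.mk output_dict).keys
  let matrix := (PySem.List.slice data (some 1) none).map (fun line => keys.map (fun key => pvCell negated line key))
  let cols := if matrix.isEmpty then keys.map (fun _ => ([] : List String)) else pvZipStar matrix
  -- {k: v + list(col) for (k, v), col in zip(output_dict.items(), cols)}
  (((PySem.Dict.mk output_dict).items.zip cols).foldl
      (fun d p => d.insert p.1.1 (p.1.2 ++ p.2)) PySem.Dict.empty).items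

-- ===== PRECONDITION & SPEC =====
-- one row is safe for every key of the dict
def pvRowOK (negated : Bool) (keys : List String) (line : List String) : Bool :=
  keys.all (fun key =>
    if key = "signature" then
      decide (15 ≤ line.length) &&
      (let parts := (PySem.Str.split? (PySem.List.pyGetD line 14 "") "/").getD []
       (if negated then decide (2 ≤ parts.length) else true) &&
       (["+", "o", "-", "+\n", "o\n", "-\n"] : List String).contains
         (PySem.List.pyGetD parts (if negated then 1 else 0) ""))
    else if key = "sentence" then decide (4 ≤ line.length)
    else if key = "neg_sentence" then decide (5 ≤ line.length)
    else if key = "complement" then decide (6 ≤ line.length)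
    else false)

-- Pre_ excludes (a) association lists with duplicate keys, which represent no Python dict (dict keys are
-- unique, so such inputs are collapsed before A ever sees them), and (b) inputs on which A raises
-- (KeyError for a key outside {sentence, neg_sentence, complement, signature} or an unmapped signature
-- field, IndexError for a row shorter than the looked-up index) — only when data has at least two rows,
-- since A's loop body never runs otherwise.
def Pre_loop_routine (data : List (List String)) (output_dict : List (String × List String)) (negated : Bool) : Prop :=
  (output_dict.map Prod.fst).Nodup ∧
  ∀ line ∈ data.tail, pvRowOK negated (output_dict.map Prod.fst) line = true

instance (data : List (List String)) (output_dict : List (String × List String)) (negated : Bool) : Decidable (Pre_loop_routine data output_dict negated) := by unfold Pre_loop_routine; infer_instance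

def pvWitness_loop_routine : List (List String) × (List (String × List String)) × Bool :=
  ([["h"], ["a", "b", "c", "S3", "N4", "C5", "x", "x", "x", "x", "x", "x", "x", "x", "+/o"]],
   [("sentence", ["s0"]), ("signature", [])], true)

def Spec_loop_routine (data : List (List String)) (output_dict : List (String × List String)) (negated : Bool) (out : List (String × List String)) : Prop := out = loop_routine_alt data output_dict negated
instance (data : List (List String)) (output_dict : List (String × List String)) (negated : Bool) (out : List (String × List String)) : Decidable (Spec_loop_routine data output_dict negated out) := by unfold Spec_loop_routine; infer_instance

-- ===== CLAIM (what is proved, stated in full; the proofs are below) =====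
def Claim_equal_loop_routine : Prop := ∀ (data : List (List String)) (output_dict : List (String × List String)) (negated : Bool), Dom_loop_routine data output_dict negated → Pre_loop_routine data output_dict negated → Spec_loop_routine data output_dict negated (loop_routine data output_dict negated)

-- ===== LEMMAS AND PROOFS =====

-- a fold over distinct keys, all present in d, modifying key k by appending g k:
-- keys are preserved and each key's value gains exactly g k.
theorem pv_foldl_modify
    (ks : List String) (g : String → List String) (d : PySem.Dict String (List String))
    (hnd : ks.Nodup) (hsub : ∀ a ∈ ks, a ∈ d.keys) :
    (ks.foldl (fun d key => d.modify key [] (fun v => v ++ g key)) d).keys = d.keys ∧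
    ∀ k, (ks.foldl (fun d key => d.modify key [] (fun v => v ++ g key)) d).getD k [] =
      if k ∈ ks then d.getD k [] ++ g k else d.getD k [] := by
  induction ks generalizing d with
  | nil => simp
  | cons a ks ih =>
    simp only [List.foldl_cons]
    have hca : d.contains a = true := (PySem.Dict.contains_iff_mem_keys d a).mpr (hsub a (by simp))
    have hkeys : (d.modify a [] (fun v => v ++ g a)).keys = d.keys := by
      rw [PySem.Dict.keys_modify, PySem.Dict.keys_insert_of_contains _ _ hca]
    have hnd' := hnd
    simp only [List.nodup_cons] at hnd'
    obtain ⟨hna, hndks⟩ := hnd'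
    have hsub' : ∀ b ∈ ks, b ∈ (d.modify a [] (fun v => v ++ g a)).keys := by
      intro b hb; rw [hkeys]; exact hsub b (by simp [hb])
    obtain ⟨ihk, ihg⟩ := ih (d.modify a [] (fun v => v ++ g a)) hndks hsub'
    refine ⟨by rw [ihk, hkeys], ?_⟩
    intro k
    rw [ihg k]
    by_cases hkks : k ∈ ks
    · have hka : k ≠ a := fun h => hna (h ▸ hkks)
      simp [hkks, hka, PySem.Dict.getD_modify]
    · by_cases hka : k = a
      · subst hka
        simp [hkks]
      · simp [hkks, hka, PySem.Dict.getD_modify]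

-- A's inner per-row step is exactly "append pvCell negated line key to key's list"
theorem pv_stepA_eq (negated : Bool) (line : List String)
    (d : PySem.Dict String (List String)) (key : String) :
    (if key == "signature" then
        d.modify "signature" []
          (fun v => v ++ [(PySem.Dict.ofList [("+", "0"), ("o", "1"), ("-", "2"), ("+\n", "0"), ("o\n", "1"), ("-\n", "2")] : PySem.Dict String String).getD
            (PySem.List.pyGetD ((PySem.Str.split? (PySem.List.pyGetD line 14 "") "/").getD [])
              (if negated then 1 else 0) "") ""])
      else
        d.modify key [] (fun v => v ++ [PySem.List.pyGetD line
          ((PySem.Dict.ofList [("sentence", 3), ("neg_sentence", 4), ("complement", 5)] : PySem.Dict String Int).getD key 0) ""])) =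
    d.modify key [] (fun v => v ++ [pvCell negated line key]) := by
  by_cases h : key = "signature"
  · subst h; simp [pvCell]
  · simp [pvCell, h]

-- A's whole row loop: each key's list gains the full column, keys preserved
theorem pv_rows_fold (negated : Bool) (rows : List (List String)) (ks : List String)
    (d : PySem.Dict String (List String)) (hnd : ks.Nodup) (hkeys : d.keys = ks) :
    (rows.foldl (fun d line =>
        d.keys.foldl (fun d key => d.modify key [] (fun v => v ++ [pvCell negated line key])) d) d).keys = ks ∧
    ∀ k, (rows.foldl (fun d line =>
        d.keys.foldl (fun d key => d.modify key [] (fun v => v ++ [pvCell negated line key])) d) d).getD k [] =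
      if k ∈ ks then d.getD k [] ++ rows.map (fun line => pvCell negated line k) else d.getD k [] := by
  induction rows generalizing d with
  | nil => simp [hkeys]
  | cons line rows ih =>
    simp only [List.foldl_cons]
    set d' := d.keys.foldl (fun d key => d.modify key [] (fun v => v ++ [pvCell negated line key])) d with hd'
    have hsub : ∀ a ∈ ks, a ∈ d.keys := by intro a ha; rw [hkeys]; exact ha
    obtain ⟨hk1, hg1⟩ := pv_foldl_modify ks (fun key => [pvCell negated line key]) d hnd hsub
    rw [hkeys] at hd'
    have hk1' : d'.keys = ks := by rw [hd', hk1, hkeys]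
    obtain ⟨ihk, ihg⟩ := ih d' hk1'
    refine ⟨ihk, ?_⟩
    intro k
    rw [ihg k, hd', hg1 k]
    by_cases hkks : k ∈ ks <;> simp [hkks]

-- transpose of a rectangular matrix built from keys: column k is the list of f r k
theorem pv_zipStar_rect (f : List String → String → String) (ks : List String) :
    ∀ rows : List (List String), rows ≠ [] →
      pvZipStar (rows.map (fun r => ks.map (f r))) = ks.map (fun k => rows.map (fun r => f r k)) := by
  induction ks with
  | nil =>
    intro rows hne
    rw [pvZipStar]
    cases rows with
    | nil => simp at hne
    | cons r rs => simp
  | cons k ks ih =>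
    intro rows hne
    rw [pvZipStar]
    cases rows with
    | nil => simp at hne
    | cons r rs =>
      have h1 : ((r :: rs).map (fun r => (k :: ks).map (f r))).isEmpty = false := by simp
      have h2 : ((r :: rs).map (fun r => (k :: ks).map (f r))).any List.isEmpty = false := by
        simp
      rw [h1, h2]
      simp only [Bool.false_or, if_neg (by simp : ¬ (false = true))]
      have hh : ((r :: rs).map (fun r => (k :: ks).map (f r))).map (fun r => r.headD "") =
          (r :: rs).map (fun r => f r k) := by
        simp [List.map_map, Function.comp]
      have ht : ((r :: rs).map (fun r => (k :: ks).map (f r))).map List.tail =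
          (r :: rs).map (fun r => ks.map (f r)) := by
        simp [List.map_map, Function.comp]
      rw [hh, ht, ih (r :: rs) (by simp)]
      simp

-- B's cols stage (guard included) is the list of columns, for ANY rows
theorem pv_cols (f : List String → String → String) (ks : List String) (rows : List (List String)) :
    (if (rows.map (fun r => ks.map (f r))).isEmpty then ks.map (fun _ => ([] : List String))
     else pvZipStar (rows.map (fun r => ks.map (f r)))) =
    ks.map (fun k => rows.map (fun r => f r k)) := by
  cases rows with
  | nil => simp
  | cons r rs =>
    rw [if_neg (by simp)]
    exact pv_zipStar_rect f ks (r :: rs) (by simp)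

-- l.zip (l.map g) pairs each element with g of it
theorem pv_zip_map_self {α β : Type} (g : α → β) (l : List α) :
    l.zip (l.map g) = l.map (fun a => (a, g a)) := by
  induction l with
  | nil => rfl
  | cons a l ih => simp [ih]

theorem loop_routine_spec_aux (data : List (List String)) (output_dict : List (String × List String)) (negated : Bool)
    (hpre : Pre_loop_routine data output_dict negated) :
    loop_routine data output_dict negated = loop_routine_alt data output_dict negated := by
  obtain ⟨hnd, -⟩ := hpre
  unfold loop_routine loop_routine_alt
  simp only [pv_stepA_eq]
  set rows := PySem.List.slice data (some 1) none with hrows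
  set d0 : PySem.Dict String (List String) := PySem.Dict.mk output_dict with hd0
  have hitems : d0.items = output_dict := rfl
  have hkeys0 : d0.keys = output_dict.map Prod.fst := rfl
  have hndk : d0.keys.Nodup := hnd
  -- A's side
  obtain ⟨hkA, hgA⟩ := pv_rows_fold negated rows d0.keys d0 hndk rfl
  -- B's cols stage
  rw [pv_cols (fun line key => pvCell negated line key) d0.keys rows]
  -- B's zip-and-insert fold
  have hzip : d0.items.zip (d0.keys.map (fun k => rows.map (fun r => pvCell negated r k))) =
      output_dict.map (fun p => (p, rows.map (fun r => pvCell negated r p.1))) := by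
    rw [hitems, hkeys0, List.map_map]
    exact pv_zip_map_self (fun p => rows.map (fun r => pvCell negated r p.1)) output_dict
  rw [hzip]
  have hfresh := PySem.Dict.items_foldl_insert_fresh
    (l := output_dict.map (fun p => (p, rows.map (fun r => pvCell negated r p.1))))
    (k := fun p => p.1.1) (v := fun p => p.1.2 ++ p.2) (d := PySem.Dict.empty)
    (by intro a _; rfl)
    (by simpa [List.map_map, Function.comp] using hnd)
  rw [hfresh]
  have hempty : (PySem.Dict.empty : PySem.Dict String (List String)).items = [] := rfl
  rw [hempty, List.nil_append]
  -- compare both item lists pointwise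
  rw [PySem.Dict.items_eq_map_keys _ (by rw [hkA]; exact hndk) ([] : List String)]
  rw [hkA, hkeys0, List.map_map, List.map_map]
  apply List.map_congr_left
  intro p hp
  have hmem : p.1 ∈ output_dict.map Prod.fst := List.mem_map_of_mem hp
  have hget : d0.getD p.1 [] = p.2 :=
    PySem.Dict.getD_of_mem_items (d := d0) (by rw [hitems]; exact hp) hndk []
  simp only [Function.comp]
  rw [hgA p.1, if_pos (by rw [hkeys0]; exact hmem), hget]

-- ===== VERDICT (by name: the statement is the Claim_ definition above) =====
theorem loop_routine_spec : Claim_equal_loop_routine := by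
  intro data output_dict negated _ hpre
  exact loop_routine_spec_aux data output_dict negated hpre
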